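-- pv_equiv track=rewrite | github.com/pm4py/pm4py-core | pm4py/algo/discovery/log_skeleton/trace_skel.py | equivalence
-- ===== SOURCE A (Python) =====
-- from collections import Counter
--
-- def equivalence(trace):
--     """
--     Get the equivalence relations given a list of activities
--
--     Parameters
--     --------------
--     trace
--         List activities
--
--     Returns
--     --------------
--     rel
--         Relations inside the trace
--     """
--     ret = list()
--     freq = activ_freq(trace)
--     for x in freq:
--         for y in freq:
--             if x != y and freq[x] == freq[y]:
--                 for i in range(freq[x]):
--                     ret.append((x, y))
--     return ret
--
-- def activ_freq(trace):
--     """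
--     Gets the frequency of activities happening in a trace
--
--     Parameters
--     --------------
--     trace
--         List activities
--
--     Returns
--     --------------
--     freq
--         Frequency of activities
--     """
--     return Counter(trace)
-- ===== SOURCE B (Python) =====
-- from collections import Counter
--
-- def equivalence(trace):
--     freq = Counter(trace)
--     groups = {}
--     for k, v in freq.items():
--         groups.setdefault(v, []).append(k)
--     ret = []
--     for x, f in freq.items():
--         for y in groups[f]:
--             if y != x:
--                 ret.extend([(x, y)] * f)
--     return ret
-- ===== Notes on version B (the rewrite author's own statement) =====
-- stated objective: faster
-- what changed: B buckets activities by frequency into a dict built in one pass and pairs each activity only with the members of its own frequency bucket, instead of A's nested scan over all activity pairs.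
import Mathlib
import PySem

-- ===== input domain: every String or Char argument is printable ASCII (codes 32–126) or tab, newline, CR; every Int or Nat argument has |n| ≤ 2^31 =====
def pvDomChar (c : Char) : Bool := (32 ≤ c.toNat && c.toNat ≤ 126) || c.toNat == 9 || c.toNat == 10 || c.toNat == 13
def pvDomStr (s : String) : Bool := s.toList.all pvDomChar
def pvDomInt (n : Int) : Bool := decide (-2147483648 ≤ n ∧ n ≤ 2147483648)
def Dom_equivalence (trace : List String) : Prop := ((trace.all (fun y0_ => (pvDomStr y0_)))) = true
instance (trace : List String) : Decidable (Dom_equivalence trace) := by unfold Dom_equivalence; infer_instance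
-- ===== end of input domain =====

-- B buckets the activities by frequency in one pass and pairs each activity only
-- with the members of its own frequency bucket, instead of A's scan over all
-- activity pairs; same return value, same order.

-- ===== PORT A =====
-- activ_freq(trace) = Counter(trace)
def activ_freq (trace : List String) : PySem.Dict String Int :=
  PySem.Dict.counter trace

def equivalence (trace : List String) : List (String × String) :=
  let freq := activ_freq trace
  freq.keys.foldl (fun ret x =>
    freq.keys.foldl (fun ret y =>
      if x ≠ y ∧ freq.getD x 0 = freq.getD y 0 then
        (PySem.List.pyRange 0 (freq.getD x 0) 1).foldl (fun ret _ => ret ++ [(x, y)]) ret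
      else ret) ret) []

-- ===== PORT B =====
def equivalence_alt (trace : List String) : List (String × String) :=
  let freq := PySem.Dict.counter trace
  -- groups.setdefault(v, []).append(k)  ==  groups[v] = groups.get(v, []) + [k]
  let groups : PySem.Dict Int (List String) :=
    freq.items.foldl (fun g p => g.modify p.2 [] (· ++ [p.1])) PySem.Dict.empty
  freq.items.foldl (fun ret p =>
    (groups.getD p.2 []).foldl (fun ret y =>
      if y ≠ p.1 then ret ++ PySem.List.pyRepeat [(p.1, y)] p.2 else ret) ret) []

-- ===== PRECONDITION & SPEC =====
def Spec_equivalence (trace : List String) (out : List (String × String)) : Prop := out = equivalence_alt trace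
instance (trace : List String) (out : List (String × String)) : Decidable (Spec_equivalence trace out) := by unfold Spec_equivalence; infer_instance

-- ===== CLAIM (what is proved, stated in full; the proofs are below) =====
def Claim_equal_equivalence : Prop := ∀ (trace : List String), Dom_equivalence trace → Spec_equivalence trace (equivalence trace)

-- ===== LEMMAS AND PROOFS =====

-- 'for i in range(n): ret.append(e)' appends n copies of e
theorem pv_foldl_app_const {α γ : Type} (l : List α) (e : γ) (acc : List γ) :
    l.foldl (fun a _ => a ++ [e]) acc = acc ++ List.replicate l.length e := by
  induction l generalizing acc with
  | nil => simp
  | cons h t ih => simp [ih, List.replicate_succ]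

theorem pv_flatMap_filter {α γ : Type} (p : α → Bool) (g : α → List γ) (l : List α) :
    (l.filter p).flatMap g = l.flatMap (fun y => if p y then g y else []) := by
  induction l with
  | nil => rfl
  | cons h t ih => by_cases hp : p h <;> simp [hp, ih]

-- A's double loop, normalised to a flatMap over the distinct activities
theorem pv_A (trace : List String) :
    equivalence trace = (PySem.Set.ofList trace).flatMap (fun x =>
      (PySem.Set.ofList trace).flatMap (fun y =>
        if x ≠ y ∧ (trace.count x : Int) = (trace.count y : Int) then
          List.replicate (trace.count x) (x, y) else [])) := by
  unfold equivalence activ_freq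
  simp only [PySem.Dict.keys_counter, PySem.Dict.getD_counter]
  rw [PySem.List.foldl_congr_mem (g := fun ret x => ret ++ (PySem.Set.ofList trace).flatMap (fun y =>
        if x ≠ y ∧ (trace.count x : Int) = (trace.count y : Int) then
          List.replicate (trace.count x) (x, y) else []))]
  · rw [PySem.List.foldl_append_eq_flatMap]; simp
  · intro acc x _
    rw [PySem.List.foldl_congr_mem (g := fun ret y => ret ++ (if x ≠ y ∧ (trace.count x : Int) = (trace.count y : Int) then
          List.replicate (trace.count x) (x, y) else []))]
    · rw [PySem.List.foldl_append_eq_flatMap]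
    · intro acc' y _
      split
      · rw [pv_foldl_app_const, PySem.List.length_pyRange_one]; simp
      · simp

-- the frequency bucket of f is the distinct activities with count f, in order
theorem pv_groups (trace : List String) (f : Int) :
    (((PySem.Dict.counter trace).items.foldl
        (fun g p => g.modify p.2 [] (· ++ [p.1])) (PySem.Dict.empty : PySem.Dict Int (List String))).getD f [])
      = (PySem.Set.ofList trace).filter (fun k => (trace.count k : Int) == f) := by
  have h : ((PySem.Dict.counter trace).items.foldl
        (fun g p => g.modify p.2 [] (· ++ [p.1])) (PySem.Dict.empty : PySem.Dict Int (List String)))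
      = (((PySem.Dict.counter trace).items.map Prod.swap).foldl
        (fun g p => g.modify p.1 [] (· ++ [p.2])) PySem.Dict.empty) := by
    rw [List.foldl_map]; simp [Prod.swap]
  rw [h, PySem.Dict.getD_foldl_modify_append, PySem.Dict.getD_empty]
  simp [PySem.Dict.items_counter, List.map_map, List.filter_map, Function.comp_def]

-- B's bucketed loop, normalised the same way
theorem pv_B (trace : List String) :
    equivalence_alt trace = (PySem.Set.ofList trace).flatMap (fun x =>
      ((PySem.Set.ofList trace).filter (fun k => (trace.count k : Int) == (trace.count x : Int))).flatMap (fun y =>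
        if y ≠ x then List.replicate (trace.count x) (x, y) else [])) := by
  unfold equivalence_alt
  simp only [pv_groups]
  rw [PySem.Dict.items_counter, List.foldl_map]
  rw [PySem.List.foldl_congr_mem (g := fun ret x => ret ++
      ((PySem.Set.ofList trace).filter (fun k => (trace.count k : Int) == (trace.count x : Int))).flatMap (fun y =>
        if y ≠ x then List.replicate (trace.count x) (x, y) else []))]
  · rw [PySem.List.foldl_append_eq_flatMap]; simp
  · intro acc x _
    rw [PySem.List.foldl_congr_mem (g := fun ret y => ret ++
        (if y ≠ x then List.replicate (trace.count x) (x, y) else []))]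
    · rw [PySem.List.foldl_append_eq_flatMap]
    · intro acc' y _
      split
      · rw [PySem.List.pyRepeat_singleton]; simp
      · simp

set_option maxRecDepth 4000 in
theorem pv_main (trace : List String) : equivalence trace = equivalence_alt trace := by
  rw [pv_A, pv_B]
  apply List.flatMap_congr
  intro x _
  rw [pv_flatMap_filter]
  apply List.flatMap_congr
  intro y _
  simp only [beq_iff_eq]
  by_cases h2 : y = x
  · subst h2
    simp only [ne_eq, not_true_eq_false, false_and, if_false, ite_self]
  · by_cases h1 : (trace.count y : Int) = (trace.count x : Int)
    · rw [if_pos h1, if_pos h2, if_pos ⟨fun h => h2 h.symm, h1.symm⟩]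
    · rw [if_neg h1, if_neg (fun h => h1 h.2.symm)]

-- ===== VERDICT (by name: the statement is the Claim_ definition above) =====
theorem equivalence_spec : Claim_equal_equivalence := by
  intro trace _
  exact pv_main trace
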